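-- pv_equiv track=rewrite | github.com/pypi-data/pypi-mirror-24 | packages/botlib/botlib-19.tar.gz/botlib-19/botlib/selector.py | wanted
-- ===== SOURCE A (Python) =====
-- def wanted(obj, want):
--     """ determine if the provided obj is matching criteria. """
--     if not want:
--         return True
--     if list(want.keys()) == ["start"]:
--         return True
--     if list(want.keys()) == ["start", "end"]:
--         return True
--     go = False
--     for key, value in want.items():
--         if not value:
--             continue
--         if value.startswith("-"):
--             continue
--         if key in ["start", "end"]:
--             continue
--         if key in obj and value and value in str(obj[key]):
--             go = True
--         else:
--             go = False
--             break
--     return go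
-- ===== SOURCE B (Python) =====
-- def _match(obj, items):
--     """tri-state recursion: None = no relevant pair seen, True/False = verdict."""
--     if not items:
--         return None
--     k, v = items[0]
--     if not v or v.startswith("-") or k in ("start", "end"):
--         return _match(obj, items[1:])
--     if not (k in obj and v in str(obj[k])):
--         return False
--     rest = _match(obj, items[1:])
--     return True if rest is None else rest
--
-- def wanted(obj, want):
--     """ determine if the provided obj is matching criteria. """
--     if not want:
--         return True
--     keys = list(want.keys())
--     if keys == ["start"] or keys == ["start", "end"]:
--         return True
--     return _match(obj, list(want.items())) is True
-- ===== Notes on version B (the rewrite author's own statement) =====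
-- stated objective: alternative
-- what changed: Replaces the flag-mutating loop with break by a tri-state recursion over the items (None = no relevant pair yet, False = first failing relevant pair, True propagated up), with the final result being 'recursion returned True'.
import Mathlib
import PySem

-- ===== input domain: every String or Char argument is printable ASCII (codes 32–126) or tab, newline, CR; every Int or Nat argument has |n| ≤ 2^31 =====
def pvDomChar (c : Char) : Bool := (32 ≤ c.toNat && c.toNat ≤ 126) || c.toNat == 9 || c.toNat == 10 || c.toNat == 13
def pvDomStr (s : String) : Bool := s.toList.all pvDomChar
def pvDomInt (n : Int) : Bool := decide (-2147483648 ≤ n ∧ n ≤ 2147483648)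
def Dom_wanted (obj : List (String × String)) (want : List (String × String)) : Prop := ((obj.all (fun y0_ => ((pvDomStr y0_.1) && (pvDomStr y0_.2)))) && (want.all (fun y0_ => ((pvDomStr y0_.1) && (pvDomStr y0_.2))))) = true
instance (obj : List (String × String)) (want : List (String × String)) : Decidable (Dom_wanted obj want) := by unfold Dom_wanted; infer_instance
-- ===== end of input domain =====

-- B replaces A's flag-mutating loop-with-break by a tri-state recursion over the items
-- (none = no relevant pair yet, false = failing pair, true propagated up); same cost.

-- ===== PORT A =====
-- the for-loop over want.items() with the 'go' flag and break
def wantedLoop (obj : PySem.Dict String String) : List (String × String) → Bool → Bool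
  | [], go => go
  | (key, value) :: rest, go =>
    if value = "" then wantedLoop obj rest go                       -- if not value: continue
    else if PySem.Str.startswith value "-" = true then wantedLoop obj rest go
    else if key = "start" ∨ key = "end" then wantedLoop obj rest go
    else
      -- key in obj and value and value in str(obj[key])
      let hit : Bool := match PySem.Dict.get? obj key with
        | some s => decide (value ≠ "") && PySem.Str.isIn value s
        | none => false
      if hit = true then wantedLoop obj rest true else false        -- go = True / go = False; break

def wanted (obj : List (String × String)) (want : List (String × String)) : Bool :=
  let wantD := PySem.Dict.ofList want     -- the parameters are dicts, given as assoc lists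
  let objD := PySem.Dict.ofList obj
  if wantD.items = [] then true
  else if wantD.keys = ["start"] then true
  else if wantD.keys = ["start", "end"] then true
  else wantedLoop objD wantD.items false

-- ===== PORT B =====
-- _match: tri-state recursion (none = no relevant pair seen, some b = verdict)
def matchRec (obj : PySem.Dict String String) : List (String × String) → Option Bool
  | [] => none
  | (k, v) :: rest =>
    if v = "" ∨ PySem.Str.startswith v "-" = true ∨ k = "start" ∨ k = "end" then
      matchRec obj rest
    else
      match PySem.Dict.get? obj k with                              -- k in obj and v in str(obj[k])
      | none => some false
      | some s =>
        if PySem.Str.isIn v s = false then some false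
        else
          match matchRec obj rest with
          | none => some true                                       -- True if rest is None
          | some b => some b                                        -- else rest

def wanted_alt (obj : List (String × String)) (want : List (String × String)) : Bool :=
  let wantD := PySem.Dict.ofList want
  let objD := PySem.Dict.ofList obj
  if wantD.items = [] then true
  else
    let keys := wantD.keys
    if keys = ["start"] ∨ keys = ["start", "end"] then true
    else matchRec objD wantD.items == some true                     -- _match(...) is True

-- ===== PRECONDITION & SPEC =====
def Spec_wanted (obj : List (String × String)) (want : List (String × String)) (out : Bool) : Prop := out = wanted_alt obj want
instance (obj : List (String × String)) (want : List (String × String)) (out : Bool) : Decidable (Spec_wanted obj want out) := by unfold Spec_wanted; infer_instance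

-- ===== CLAIM (what is proved, stated in full; the proofs are below) =====
def Claim_equal_wanted : Prop := ∀ (obj : List (String × String)) (want : List (String × String)), Dom_wanted obj want → Spec_wanted obj want (wanted obj want)

-- ===== LEMMAS AND PROOFS =====
-- proof-only helpers: the common characterisation both loops are reduced to
def relevantP (kv : String × String) : Bool :=
  decide (kv.2 ≠ "") && !PySem.Str.startswith kv.2 "-" && decide (kv.1 ≠ "start") && decide (kv.1 ≠ "end")

def matchPair (obj : PySem.Dict String String) (kv : String × String) : Bool :=
  match PySem.Dict.get? obj kv.1 with
  | some s => PySem.Str.isIn kv.2 s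
  | none => false

-- A's flag loop computes: 'go' if no relevant pair remains, else "all relevant pairs match".
theorem wantedLoop_eq (obj : PySem.Dict String String) :
    ∀ (l : List (String × String)) (go : Bool),
      wantedLoop obj l go =
        (if l.filter relevantP = [] then go else (l.filter relevantP).all (matchPair obj)) := by
  intro l
  induction l with
  | nil => intro go; simp [wantedLoop]
  | cons kv rest ih =>
    intro go
    obtain ⟨key, value⟩ := kv
    by_cases hrel : relevantP (key, value) = true
    · have h' := hrel
      simp only [relevantP, Bool.and_eq_true, decide_eq_true_eq, Bool.not_eq_true'] at h'
      have h1 : ¬ value = "" := h'.1.1.1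
      have h2 : ¬ PySem.Str.startswith value "-" = true := by rw [h'.1.1.2]; simp
      have h3 : ¬ (key = "start" ∨ key = "end") := by
        rintro (h | h)
        · exact h'.1.2 h
        · exact h'.2 h
      have hstep : wantedLoop obj ((key, value) :: rest) go =
          (if matchPair obj (key, value) = true then wantedLoop obj rest true else false) := by
        rw [wantedLoop, if_neg h1, if_neg h2, if_neg h3]
        have hm : (match PySem.Dict.get? obj key with
            | some s => decide (value ≠ "") && PySem.Str.isIn value s
            | none => false) = matchPair obj (key, value) := by
          unfold matchPair; cases PySem.Dict.get? obj key <;> simp [h1]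
        rw [hm]
      rw [hstep, List.filter_cons, if_pos hrel,
        if_neg (show ¬ ((key, value) :: List.filter relevantP rest = []) from List.cons_ne_nil _ _),
        List.all_cons]
      by_cases h4 : matchPair obj (key, value) = true
      · rw [if_pos h4, h4, Bool.true_and, ih true]
        by_cases hf : List.filter relevantP rest = []
        · rw [if_pos hf, hf, List.all_nil]
        · rw [if_neg hf]
      · rw [if_neg h4, show matchPair obj (key, value) = false from by simpa using h4,
          Bool.false_and]
    · have hrf : relevantP (key, value) = false := by simpa using hrel
      have hstep : wantedLoop obj ((key, value) :: rest) go = wantedLoop obj rest go := by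
        rw [wantedLoop]
        by_cases h1 : value = ""
        · rw [if_pos h1]
        · rw [if_neg h1]
          by_cases h2 : PySem.Str.startswith value "-" = true
          · rw [if_pos h2]
          · rw [if_neg h2]
            have h2' : PySem.Chars.startswith value.toList ['-'] = false := by simpa using h2
            have h3 : key = "start" ∨ key = "end" := by
              simp [relevantP, h1, h2'] at hrf; tauto
            rw [if_pos h3]
      rw [hstep, ih, List.filter_cons, if_neg (show ¬ (relevantP (key, value) = true) from by
        simp [hrf])]

-- B's tri-state recursion computes: none if no relevant pair, else some "all relevant pairs match".
theorem matchRec_eq (obj : PySem.Dict String String) :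
    ∀ (l : List (String × String)),
      matchRec obj l =
        (if l.filter relevantP = [] then none else some ((l.filter relevantP).all (matchPair obj))) := by
  intro l
  induction l with
  | nil => simp [matchRec]
  | cons kv rest ih =>
    obtain ⟨k, v⟩ := kv
    by_cases hrel : relevantP (k, v) = true
    · have h' := hrel
      simp only [relevantP, Bool.and_eq_true, decide_eq_true_eq, Bool.not_eq_true'] at h'
      have hg : ¬ (v = "" ∨ PySem.Str.startswith v "-" = true ∨ k = "start" ∨ k = "end") := by
        rintro (h | h | h | h)
        · exact h'.1.1.1 h
        · rw [h'.1.1.2] at h; exact Bool.false_ne_true h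
        · exact h'.1.2 h
        · exact h'.2 h
      rw [matchRec, if_neg hg, List.filter_cons, if_pos hrel,
        if_neg (show ¬ ((k, v) :: List.filter relevantP rest = []) from List.cons_ne_nil _ _),
        List.all_cons]
      unfold matchPair
      cases hget : PySem.Dict.get? obj k with
      | none => simp
      | some s =>
        by_cases hin : PySem.Str.isIn v s = false
        · have hinC : PySem.Chars.isIn v.toList s.toList = false := by simpa using hin
          simp [hinC]
        · have hin'C : PySem.Chars.isIn v.toList s.toList = true := by
            simpa [PySem.Str.isIn] using hin
          rw [ih]
          by_cases hf : List.filter relevantP rest = []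
          · rw [if_pos hf, hf]; simp [hin'C]
          · rw [if_neg hf]; simp [hin'C, matchPair, PySem.Str.isIn]
    · have hrf : relevantP (k, v) = false := by simpa using hrel
      have hg : v = "" ∨ PySem.Str.startswith v "-" = true ∨ k = "start" ∨ k = "end" := by
        by_cases h1 : v = ""
        · exact Or.inl h1
        · by_cases h2 : PySem.Str.startswith v "-" = true
          · exact Or.inr (Or.inl h2)
          · have h2' : PySem.Chars.startswith v.toList ['-'] = false := by simpa using h2
            have : k = "start" ∨ k = "end" := by
              simp [relevantP, h1, h2'] at hrf; tauto
            exact Or.inr (Or.inr this)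
      rw [matchRec, if_pos hg, ih, List.filter_cons,
        if_neg (show ¬ (relevantP (k, v) = true) from by simp [hrf])]

-- ===== VERDICT (by name: the statement is the Claim_ definition above) =====
theorem wanted_spec : Claim_equal_wanted := by
  intro obj want _
  unfold Spec_wanted wanted wanted_alt
  simp only [wantedLoop_eq, matchRec_eq]
  by_cases h0 : (PySem.Dict.ofList want).items = []
  · simp [h0]
  · rw [if_neg h0, if_neg h0]
    by_cases h1 : (PySem.Dict.ofList want).keys = ["start"]
    · simp [h1]
    · by_cases h2 : (PySem.Dict.ofList want).keys = ["start", "end"]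
      · simp [h2]
      · rw [if_neg h1, if_neg h2, if_neg (by tauto : ¬ ((PySem.Dict.ofList want).keys = ["start"] ∨ (PySem.Dict.ofList want).keys = ["start", "end"]))]
        by_cases hf : ((PySem.Dict.ofList want).items).filter relevantP = []
        · simp [hf]
        · rw [if_neg hf, if_neg hf]
          cases ((PySem.Dict.ofList want).items.filter relevantP).all (matchPair (PySem.Dict.ofList obj)) <;> simp
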